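-- pv_equiv track=rewrite | github.com/arara90/AlgorithmAndDataStructure | Programmers/11st.py | solution
-- ===== SOURCE A (Python) =====
-- def solution(S):
--     if(S.find('aaa')>=0):
--         return -1
--
--     elif(S=='aa'):
--         return 0
--
--     else:
--         s_list = list(S)
--         ans = 'aa'
--         cnt = 0
--         for idx, item in enumerate(s_list):
--             if(idx==0):
--                 if(item=='a'):
--                     ans = 'a' + item
--                     cnt += 1
--                 else:
--                     ans = 'aa' + item
--                     cnt += 2
--
--             if(item == 'a'):
--                 if(ans[-2:]=='aa'):
--                     continue
--
--                 tmp = item + 'a'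
--                 cnt += 1
--
--             else:
--                 tmp = item + 'aa'
--                 cnt += 2
--             ans += tmp
--
--         return cnt
-- ===== SOURCE B (Python) =====
-- def solution(S):
--     if S.find('aaa') >= 0:
--         return -1
--     if S == 'aa':
--         return 0
--     if S == '':
--         return 0
--     na = sum(1 for c in S if c != 'a')
--     return (1 if S.startswith('a') else 2) + 2 * na
-- ===== Notes on version B (the rewrite author's own statement) =====
-- stated objective: simpler
-- what changed: Replaces A's character-by-character string-building simulation (the growing 'ans' accumulator and its always-true 'aa'-suffix test) with a direct arithmetic closed form: count the non-'a' characters once and return 1+2*na or 2+2*na depending on the first character, keeping A's guards for 'aaa', 'aa' and the empty string.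
import Mathlib
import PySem

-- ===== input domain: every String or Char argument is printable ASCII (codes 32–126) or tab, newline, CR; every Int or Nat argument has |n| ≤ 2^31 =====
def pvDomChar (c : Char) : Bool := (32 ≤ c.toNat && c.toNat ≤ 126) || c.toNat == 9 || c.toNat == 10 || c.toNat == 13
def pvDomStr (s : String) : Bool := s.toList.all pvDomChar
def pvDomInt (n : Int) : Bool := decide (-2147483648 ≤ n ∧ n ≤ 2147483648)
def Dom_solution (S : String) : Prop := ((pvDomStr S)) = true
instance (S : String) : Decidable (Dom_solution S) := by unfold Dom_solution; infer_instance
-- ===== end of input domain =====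

-- B replaces A's string-building simulation by a closed-form count of non-'a' characters; simpler.

-- ===== PORT A =====
-- the for-loop over enumerate(s_list) with state (ans, cnt); ans[-2:] is PySem.List.slice (some (-2)) none
def solutionLoop : List (Int × Char) → List Char → Int → (List Char × Int)
  | [], ans, cnt => (ans, cnt)
  | (idx, item) :: rest, ans, cnt =>
    let st : List Char × Int :=
      if idx = 0 then
        (if item = 'a' then (['a', item], cnt + 1) else (['a', 'a', item], cnt + 2))
      else (ans, cnt)
    if item = 'a' then
      if PySem.List.slice st.1 (some (-2)) none = ['a', 'a'] then
        solutionLoop rest st.1 st.2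
      else
        solutionLoop rest (st.1 ++ [item, 'a']) (st.2 + 1)
    else
      solutionLoop rest (st.1 ++ [item, 'a', 'a']) (st.2 + 2)

def solution (S : String) : Int :=
  if 0 ≤ PySem.Str.find S "aaa" then -1
  else if S = "aa" then 0
  else (solutionLoop (PySem.List.enumerate S.toList 0) ['a', 'a'] 0).2

-- ===== PORT B =====
def solution_alt (S : String) : Int :=
  if 0 ≤ PySem.Str.find S "aaa" then -1
  else if S = "aa" then 0
  else if S = "" then 0
  else
    let na : Int := ((S.toList.filter (fun c => c ≠ 'a')).length : Int)
    (if PySem.Str.startswith S "a" then 1 else 2) + 2 * na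

-- ===== PRECONDITION & SPEC =====
def Spec_solution (S : String) (out : Int) : Prop := out = solution_alt S
instance (S : String) (out : Int) : Decidable (Spec_solution S out) := by unfold Spec_solution; infer_instance

-- ===== CLAIM (what is proved, stated in full; the proofs are below) =====
def Claim_equal_solution : Prop := ∀ (S : String), Dom_solution S → Spec_solution S (solution S)

-- ===== LEMMAS AND PROOFS =====

-- xs ++ [c,'a','a'] always ends with "aa"
lemma lastTwo_append3 (xs : List Char) (c : Char) :
    PySem.List.slice (xs ++ [c, 'a', 'a']) (some (-2)) none = ['a', 'a'] := by
  rw [PySem.List.slice_from_neg_ofNat _ 2 (by omega)]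
  simp [List.drop_append]

-- the loop over indices ≥ 1, started with an ans ending in "aa", adds 2 per non-'a' char
lemma loop_enum (xs : List Char) : ∀ (s : Int) (ans : List Char) (cnt : Int),
    1 ≤ s →
    PySem.List.slice ans (some (-2)) none = ['a', 'a'] →
    (solutionLoop (PySem.List.enumerate xs s) ans cnt).2
      = cnt + 2 * ((xs.filter (fun c => c ≠ 'a')).length : Int) := by
  induction xs with
  | nil => intro s ans cnt _ _; simp [PySem.List.enumerate, solutionLoop]
  | cons c t ih =>
    intro s ans cnt hs hans
    rw [PySem.List.enumerate_cons]
    simp only [solutionLoop]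
    rw [if_neg (show ¬ s = 0 by omega)]
    by_cases hc : c = 'a'
    · simp only [hc, ite_true, hans]
      rw [ih (s + 1) ans cnt (by omega) hans]
      simp
    · simp only [hc, ite_false]
      rw [ih (s + 1) (ans ++ [c, 'a', 'a']) (cnt + 2) (by omega) (lastTwo_append3 ans c)]
      simp [hc]
      ring

theorem solution_eq_alt (S : String) : solution S = solution_alt S := by
  unfold solution solution_alt
  by_cases h1 : 0 ≤ PySem.Str.find S "aaa"
  · rw [if_pos h1, if_pos h1]
  · rw [if_neg h1, if_neg h1]
    by_cases h2 : S = "aa"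
    · rw [if_pos h2, if_pos h2]
    · rw [if_neg h2, if_neg h2]
      rcases hL : S.toList with _ | ⟨c, t⟩
      · have hS : S = "" := String.toList_eq_nil_iff.mp hL
        simp [hS, PySem.List.enumerate, solutionLoop]
      · have hS : S ≠ "" := by
          intro h; rw [h] at hL; simp at hL
        rw [PySem.List.enumerate_cons]
        by_cases hc : c = 'a'
        · have hsl : PySem.List.slice ['a', 'a'] (some (-2)) none = ['a', 'a'] := by decide
          simp only [solutionLoop, hc]
          simp [hsl]
          rw [loop_enum t 1 ['a', 'a'] 1 (by omega) hsl]
          simp [hS, hL, PySem.Chars.startswith, List.isPrefixOf]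
          exact hc.symm
        · have hsl : PySem.List.slice ['a', 'a', c, c, 'a', 'a'] (some (-2)) none = ['a', 'a'] := by
            simpa using lastTwo_append3 ['a', 'a', c] c
          simp only [solutionLoop]
          simp [hc]
          rw [loop_enum t 1 ['a', 'a', c, c, 'a', 'a'] 4 (by omega) hsl]
          simp [hS, hL, PySem.Chars.startswith, List.isPrefixOf]
          rw [if_neg (fun h => hc (Eq.symm h))]
          ring

-- ===== VERDICT (by name: the statement is the Claim_ definition above) =====
theorem solution_spec : Claim_equal_solution := by
  intro S _
  unfold Spec_solution
  exact solution_eq_alt S
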